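-- pv_equiv track=rewrite | github.com/qwas15788hj/Baekjoon | 프로그래머스/lv2/42586. 기능개발/기능개발.py | solution
-- ===== SOURCE A (Python) =====
-- def solution(progresses, speeds):
--     answer = []
--     stack = [0] * len(progresses) # 몇 일 걸리는지 저장하는 스택
--     for i in range(len(progresses)): # 프로그래스 반복
--         day = (100 - progresses[i]) // speeds[i] # 몇일걸리는지 계산
--         if progresses[i] + day * speeds[i] < 100: # 계산에서 나온 day만큼 계산했는데 100보다 작으면
--             day += 1 # 1일 추가
--         stack[i] = day # day 값 저장
--
--     now = stack[0] # 현재 요일 = 처음 걸리는 요일로 선언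
--     num = 1 # 개수 1로 선언
--     for i in range(1, len(stack)): # 1 ~ 스택 길이만큼 반복
--         if stack[i] <= now: # 이전의 값이 현재 스택의 요소보다 크거나 같으면
--             num += 1 # 한꺼번에 가능함으로 num 증가
--         else: # 현재 스택이 이전의 값보다 크면
--             now = stack[i] # now 초기화
--             answer.append(num) # answer에 num 저장
--             num = 1 # num 1로 초기화
--     answer.append(num) # 마지막 num이 저장이 안됨으로 예외처리
--
--     return answer
-- ===== SOURCE B (Python) =====
-- def solution(progresses, speeds):
--     # days needed per feature: quotient plus one when a positive remainder is left
--     days = []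
--     for p, s in zip(progresses, speeds):
--         d, r = divmod(100 - p, s)
--         days.append(d + (r > 0))
--
--     # recursive group-splitting: the group leader is the first remaining day;
--     # the group ends at the first later feature that needs strictly more days.
--     def groups(ds):
--         if not ds:
--             return []
--         lead, rest = ds[0], ds[1:]
--         i = next((j for j, d in enumerate(rest) if d > lead), len(rest))
--         return [i + 1] + groups(rest[i:])
--
--     return groups(days)
-- ===== Notes on version B (the rewrite author's own statement) =====
-- stated objective: alternative
-- what changed: Replaces A's single-pass now/num state machine with a recursive group-splitting: each call takes the first remaining day as the group leader, finds the first later day exceeding it, emits that group's length and recurses on the suffix; the per-feature day count uses the divmod remainder instead of A's multiply-back comparison.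
import Mathlib
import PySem

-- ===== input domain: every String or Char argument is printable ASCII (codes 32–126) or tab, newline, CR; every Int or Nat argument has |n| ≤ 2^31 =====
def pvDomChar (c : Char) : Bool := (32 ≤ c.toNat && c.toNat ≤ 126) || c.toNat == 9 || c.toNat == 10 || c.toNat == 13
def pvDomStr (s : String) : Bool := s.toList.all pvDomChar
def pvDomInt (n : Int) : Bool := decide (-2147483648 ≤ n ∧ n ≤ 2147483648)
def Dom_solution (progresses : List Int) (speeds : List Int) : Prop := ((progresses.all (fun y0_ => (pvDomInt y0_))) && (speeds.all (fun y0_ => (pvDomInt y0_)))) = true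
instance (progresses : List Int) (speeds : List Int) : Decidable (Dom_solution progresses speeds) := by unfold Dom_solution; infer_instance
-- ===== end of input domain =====

-- B replaces A's single-pass now/num state machine with a recursive group-splitting
-- (leader + first index exceeding it, recurse on the suffix); days use the divmod remainder
-- instead of A's multiply-back check (alternative decomposition, same cost).


-- ===== PORT A =====
-- stack[i] = day for i in range(len(progresses))  (pyGetD is exact under Pre_: indices in range)
def solution_stack (progresses : List Int) (speeds : List Int) : List Int :=
  (PySem.List.pyRange 0 (progresses.length : Int) 1).map (fun i =>
    let p := PySem.List.pyGetD progresses i 0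
    let s := PySem.List.pyGetD speeds i 0
    let day := PySem.Int.floordiv (100 - p) s
    if p + day * s < 100 then day + 1 else day)

def solution (progresses : List Int) (speeds : List Int) : List Int :=
  let stack := solution_stack progresses speeds
  let now := PySem.List.pyGetD stack 0 0
  let st :=
    (PySem.List.pyRange 1 (stack.length : Int) 1).foldl
      (fun (st : List Int × Int × Int) i =>
        let x := PySem.List.pyGetD stack i 0
        if x ≤ st.2.1 then (st.1, st.2.1, st.2.2 + 1)
        else (st.1 ++ [st.2.2], x, 1))
      ([], now, 1)
  st.1 ++ [st.2.2]

-- ===== PORT B =====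
-- days from zipped pairs: d, r = divmod(100 - p, s); d + (r > 0)
def solution_alt_days (progresses : List Int) (speeds : List Int) : List Int :=
  (progresses.zip speeds).map (fun pr =>
    let d := PySem.Int.floordiv (100 - pr.1) pr.2
    let r := PySem.Int.mod (100 - pr.1) pr.2
    d + (if 0 < r then 1 else 0))

-- groups(ds): lead = ds[0]; i = first index of rest with d > lead (len(rest) if none,
-- which is exactly List.findIdx); emit i+1 and recurse on rest[i:] (a nonneg slice = drop)
def solution_alt_groups : List Int → List Int
  | [] => []
  | lead :: rest =>
    let i := rest.findIdx (fun d => lead < d)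
    ((i : Int) + 1) :: solution_alt_groups (rest.drop i)
termination_by ds => ds.length
decreasing_by simp [List.length_drop]

def solution_alt (progresses : List Int) (speeds : List Int) : List Int :=
  solution_alt_groups (solution_alt_days progresses speeds)

-- ===== PRECONDITION & SPEC =====
-- Pre_: exactly where Python A returns: a first feature exists (stack[0]), every index has a speed,
-- and no used speed is 0 (ZeroDivisionError).
def Pre_solution (progresses : List Int) (speeds : List Int) : Prop :=
  progresses ≠ [] ∧ progresses.length ≤ speeds.length ∧
    ∀ s ∈ speeds.take progresses.length, s ≠ 0
instance (progresses : List Int) (speeds : List Int) : Decidable (Pre_solution progresses speeds) := by unfold Pre_solution; infer_instance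
def pvWitness_solution : List Int × List Int := ([93, 30, 55], [1, 30, 5])

def Spec_solution (progresses : List Int) (speeds : List Int) (out : List Int) : Prop := out = solution_alt progresses speeds
instance (progresses : List Int) (speeds : List Int) (out : List Int) : Decidable (Spec_solution progresses speeds out) := by unfold Spec_solution; infer_instance

-- ===== CLAIM (what is proved, stated in full; the proofs are below) =====
def Claim_equal_solution : Prop := ∀ (progresses : List Int) (speeds : List Int), Dom_solution progresses speeds → Pre_solution progresses speeds → Spec_solution progresses speeds (solution progresses speeds)

-- ===== LEMMAS AND PROOFS =====

-- common abstraction of the grouping: current leader, current count, remaining days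
def gAux (now num : Int) : List Int → List Int
  | [] => [num]
  | x :: xs => if x ≤ now then gAux now (num + 1) xs else num :: gAux x 1 xs

-- A's stack equals B's days list (floordiv_mul_add_mod holds for every divisor)
theorem stack_eq_days (ps ss : List Int) (h : ps.length ≤ ss.length) :
    solution_stack ps ss = solution_alt_days ps ss := by
  apply List.ext_getElem
  · simp [solution_stack, solution_alt_days, PySem.List.length_pyRange_one]
    omega
  · intro k h1 h2
    have hk : k < ps.length := by
      simpa [solution_stack, PySem.List.length_pyRange_one] using h1
    have hks : k < ss.length := lt_of_lt_of_le hk h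
    simp only [solution_stack, solution_alt_days, List.getElem_map,
      PySem.List.getElem_pyRange_one, List.getElem_zip]
    have hg1 : PySem.List.pyGetD ps ((0 : Int) + (k : Int)) 0 = ps[k] := by
      rw [zero_add, PySem.List.pyGetD_natCast]
      simp [List.getD, List.getElem?_eq_getElem hk]
    have hg2 : PySem.List.pyGetD ss ((0 : Int) + (k : Int)) 0 = ss[k] := by
      rw [zero_add, PySem.List.pyGetD_natCast]
      simp [List.getD, List.getElem?_eq_getElem hks]
    rw [hg1, hg2]
    have hdm := PySem.Int.floordiv_mul_add_mod (100 - ps[k]) ss[k]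
    split_ifs with h1' h2' h2' <;> omega

-- A's second loop, folded over the tail list, produces gAux
theorem foldA_gAux (l : List Int) :
    ∀ (ans : List Int) (now num : Int),
      (l.foldl
        (fun (st : List Int × Int × Int) x =>
          if x ≤ st.2.1 then (st.1, st.2.1, st.2.2 + 1)
          else (st.1 ++ [st.2.2], x, 1)) (ans, now, num)).1
      ++ [(l.foldl
        (fun (st : List Int × Int × Int) x =>
          if x ≤ st.2.1 then (st.1, st.2.1, st.2.2 + 1)
          else (st.1 ++ [st.2.2], x, 1)) (ans, now, num)).2.2]
      = ans ++ gAux now num l := by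
  induction l with
  | nil => intro ans now num; simp [gAux]
  | cons x xs ih =>
    intro ans now num
    by_cases hx : x ≤ now
    · simp only [List.foldl_cons, gAux, if_pos hx]
      exact ih ans now (num + 1)
    · simp only [List.foldl_cons, gAux, if_neg hx]
      rw [ih (ans ++ [num]) x 1, List.append_assoc]
      rfl

-- unfolding equations of the well-founded recursion
theorem groups_nil : solution_alt_groups [] = [] := by
  rw [solution_alt_groups.eq_def]

theorem groups_cons (lead : Int) (rest : List Int) :
    solution_alt_groups (lead :: rest)
      = ((rest.findIdx (fun d => lead < d) : Int) + 1)
        :: solution_alt_groups (rest.drop (rest.findIdx (fun d => lead < d))) := by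
  rw [solution_alt_groups.eq_def]

-- B's recursion computes gAux: the findIdx split matches the leader-threshold recursion
theorem gAux_eq_groups (l : List Int) :
    ∀ (now num : Int),
      gAux now num l
      = (num + (l.findIdx (fun d => now < d) : Int))
        :: solution_alt_groups (l.drop (l.findIdx (fun d => now < d))) := by
  induction l with
  | nil => intro now num; simp [gAux, groups_nil]
  | cons x xs ih =>
    intro now num
    by_cases hx : x ≤ now
    · have hp : ¬ (now < x) := not_lt.mpr hx
      rw [gAux, if_pos hx, List.findIdx_cons]
      simp only [hp, decide_false, cond_false]
      rw [ih now (num + 1)]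
      simp only [List.drop_succ_cons]
      congr 1
      push_cast
      ring
    · have hlt : now < x := lt_of_not_ge hx
      rw [gAux, if_neg hx, List.findIdx_cons]
      simp only [hlt, decide_true, cond_true, Nat.cast_zero, List.drop_zero]
      rw [groups_cons, ih x 1]
      simp [add_comm]

-- ===== VERDICT (by name: the statement is the Claim_ definition above) =====
theorem solution_spec : Claim_equal_solution := by
  intro ps ss _ hpre
  obtain ⟨hne, hlen, -⟩ := hpre
  simp only [Spec_solution, solution, solution_alt]
  rw [stack_eq_days ps ss hlen]
  have hdne : solution_alt_days ps ss ≠ [] := by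
    have h1 : 0 < ps.length := List.length_pos_of_ne_nil hne
    intro h
    have h2 : (solution_alt_days ps ss).length = 0 := by rw [h]; rfl
    simp [solution_alt_days] at h2
    rcases h2 with h2 | h2
    · exact hne h2
    · subst h2; exact hne (by simpa using hlen)
  obtain ⟨d0, ds, hcons⟩ := List.exists_cons_of_ne_nil hdne
  rw [hcons]
  have hget0 : PySem.List.pyGetD (d0 :: ds) (0 : Int) 0 = d0 := PySem.List.pyGetD_zero_cons _ _ _
  rw [hget0]
  have hfold : (PySem.List.pyRange 1 (((d0 :: ds).length : Int)) 1).foldl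
      (fun (st : List Int × Int × Int) i =>
        if PySem.List.pyGetD (d0 :: ds) i 0 ≤ st.2.1 then (st.1, st.2.1, st.2.2 + 1)
        else (st.1 ++ [st.2.2], PySem.List.pyGetD (d0 :: ds) i 0, 1))
      ([], d0, 1)
      = ds.foldl
        (fun (st : List Int × Int × Int) x =>
          if x ≤ st.2.1 then (st.1, st.2.1, st.2.2 + 1)
          else (st.1 ++ [st.2.2], x, 1)) ([], d0, 1) := by
    have h := PySem.List.foldl_pyRange_pyGetD (xs := d0 :: ds) (a := 1) (d := 0)
      (f := fun (st : List Int × Int × Int) x =>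
        if x ≤ st.2.1 then (st.1, st.2.1, st.2.2 + 1)
        else (st.1 ++ [st.2.2], x, 1))
      (init := ([], d0, 1)) (by omega)
    simpa using h
  rw [hfold]
  have hA := foldA_gAux ds [] d0 1
  simp only [List.nil_append] at hA
  rw [hA, gAux_eq_groups ds d0 1, groups_cons]
  simp [add_comm]
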